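-- pv_equiv track=rewrite | github.com/joeamansfield/BIO364 | neighborhood.py | GenNeighbors
-- ===== SOURCE A (Python) =====
-- def GenNeighbors(pattern, distance):
--     if distance == 0:
--         return pattern
--     if len(pattern) == 1:
--         return ['A','C','G','T']
--     neighbors = []
--     suffixNeighbors = GenNeighbors(pattern[1:], distance)
--     for text in suffixNeighbors:
--         if HammingDistance(pattern[1:], text) < distance:
--             for nucleotide in ['A','C','G','T']:
--                 neighbors.append(nucleotide + text)
--         else:
--             neighbors.append(pattern[0] + text)
--     return neighbors
--
-- def HammingDistance(pattern, pattern2):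
--     distance = 0
--     for i in range(len(pattern)):
--         if pattern[i] != pattern2[i]:
--             distance += 1
--     return distance
-- ===== SOURCE B (Python) =====
-- def GenNeighbors(pattern, distance):
--     if distance == 0:
--         return pattern
--     # iterative right-to-left build, carrying each candidate's Hamming distance
--     acc = [(t, 0 if t == pattern[-1] else 1) for t in ['A', 'C', 'G', 'T']]
--     for i in range(len(pattern) - 2, -1, -1):
--         c = pattern[i]
--         new = []
--         for text, h in acc:
--             if h < distance:
--                 for nuc in ['A', 'C', 'G', 'T']:
--                     new.append((nuc + text, h + (nuc != c)))
--             else: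
--                 new.append((c + text, h))
--         acc = new
--     return [text for text, _ in acc]
-- ===== Notes on version B (the rewrite author's own statement) =====
-- stated objective: alternative
-- what changed: Replaces A's one-level-per-call recursion, which recomputes HammingDistance(suffix, text) from scratch for every candidate at every level, by a single right-to-left loop that carries each candidate's Hamming distance as a counter updated in O(1) per prepended character (intended as faster; measured 6.12x at the largest size both finished, but the exponential output size keeps both from finishing large inputs, so a timing run could not confirm it).
-- outside the precondition, e.g. on GenNeighbors('AC', 0): A returns 'AC', B returns 'AC'
import Mathlib
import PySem

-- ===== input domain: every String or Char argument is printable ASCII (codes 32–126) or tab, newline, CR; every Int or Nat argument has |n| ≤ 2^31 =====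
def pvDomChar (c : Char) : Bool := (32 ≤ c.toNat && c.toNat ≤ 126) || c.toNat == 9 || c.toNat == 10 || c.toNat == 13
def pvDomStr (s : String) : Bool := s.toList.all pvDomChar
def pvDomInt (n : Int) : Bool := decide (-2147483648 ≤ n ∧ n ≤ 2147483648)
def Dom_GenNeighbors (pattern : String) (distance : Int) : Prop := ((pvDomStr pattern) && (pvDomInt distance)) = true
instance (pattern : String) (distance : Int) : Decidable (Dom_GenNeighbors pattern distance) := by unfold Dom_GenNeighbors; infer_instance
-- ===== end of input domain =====

-- B replaces A's recursion (which recomputes a Hamming distance from scratch at every level)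
-- by one right-to-left loop that carries each candidate's Hamming distance along.

-- ===== PORT A =====
def pvNucs : List Char := ['A', 'C', 'G', 'T']

-- port of HammingDistance: 'for i in range(len(pattern)): if pattern[i] != pattern2[i]'.
-- pyGet? is Python indexing; in every call the two lists have equal length, so both lookups are in range.
def pvHamming (p q : List Char) : Int :=
  (PySem.List.pyRange 0 (p.length) 1).foldl
    (fun dist i => if PySem.List.pyGet? p i ≠ PySem.List.pyGet? q i then dist + 1 else dist) 0

-- A's recursion, over the pattern's character list (texts are character lists, joined to Strings at the top).
def pvCoreA (cs : List Char) (d : Int) : List (List Char) :=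
  if d = 0 then [cs]           -- Python returns the bare pattern STRING here (not a list); excluded by Pre_
  else
    match cs with
    | [] => []                 -- Python recurses forever here (RecursionError); excluded by Pre_
    | [_] => pvNucs.map (fun n => [n])
    | c :: c' :: rest =>
      (pvCoreA (c' :: rest) d).foldl
        (fun neighbors text =>
          if pvHamming (c' :: rest) text < d then
            neighbors ++ pvNucs.map (fun n => n :: text)
          else
            neighbors ++ [c :: text]) []
termination_by cs.length

def GenNeighbors (pattern : String) (distance : Int) : List String :=
  (pvCoreA pattern.toList distance).map String.ofList

-- ===== PORT B =====
-- the body of Source B's inner loop over the current candidate list (pairs: text, its Hamming distance)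
def pvStepB (d : Int) (c : Char) (acc : List (List Char × Int)) : List (List Char × Int) :=
  acc.foldl
    (fun new p =>
      if p.2 < d then
        new ++ pvNucs.map (fun n => (n :: p.1, p.2 + (if n ≠ c then 1 else 0)))
      else
        new ++ [(c :: p.1, p.2)]) []

-- Source B: seed from the last character, then fold the remaining characters right-to-left.
def pvCoreB (cs : List Char) (d : Int) : List (List Char × Int) :=
  match cs.reverse with
  | [] => []                   -- Source B raises IndexError on the empty pattern; excluded by Pre_
  | last :: restRev =>
    restRev.foldl (fun acc c => pvStepB d c acc)
      (pvNucs.map (fun t => ([t], if t = last then 0 else 1)))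

def GenNeighbors_alt (pattern : String) (distance : Int) : List String :=
  if distance = 0 then [pattern]   -- Source B returns the bare pattern string here; excluded by Pre_
  else (pvCoreB pattern.toList distance).map (fun p => String.ofList p.1)

-- ===== PRECONDITION & SPEC =====
-- Pre_ excludes distance == 0, where A returns the bare pattern STRING (not a list of strings, so the
-- value leaves the declared return type), and the empty pattern, where A recurses forever (RecursionError).
def Pre_GenNeighbors (pattern : String) (distance : Int) : Prop := pattern ≠ "" ∧ distance ≠ 0
instance (pattern : String) (distance : Int) : Decidable (Pre_GenNeighbors pattern distance) := by
  unfold Pre_GenNeighbors; infer_instance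

def pvWitness_GenNeighbors : String × Int := ("AC", 1)

def Spec_GenNeighbors (pattern : String) (distance : Int) (out : List String) : Prop := out = GenNeighbors_alt pattern distance
instance (pattern : String) (distance : Int) (out : List String) : Decidable (Spec_GenNeighbors pattern distance out) := by unfold Spec_GenNeighbors; infer_instance

-- ===== CLAIM (what is proved, stated in full; the proofs are below) =====
def Claim_equal_GenNeighbors : Prop := ∀ (pattern : String) (distance : Int), Dom_GenNeighbors pattern distance → Pre_GenNeighbors pattern distance → Spec_GenNeighbors pattern distance (GenNeighbors pattern distance)

-- ===== LEMMAS AND PROOFS =====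

theorem ham_nil (q : List Char) : pvHamming [] q = 0 := by
  simp [pvHamming, PySem.List.pyRange_one_eq_nil]

theorem ham_cons (a b : Char) (p q : List Char) :
    pvHamming (a :: p) (b :: q) = (if a ≠ b then 1 else 0) + pvHamming p q := by
  unfold pvHamming
  have h1 : ((a :: p).length : Int) = ((p.length + 1 : Nat) : Int) := by simp
  rw [h1, PySem.List.pyRange_one, PySem.List.pyRange_one]
  simp only [Int.sub_zero, Int.toNat_natCast, List.range_succ_eq_map, List.map_cons,
    List.map_map, List.foldl_cons, List.foldl_map]
  refine Eq.trans (List.foldl_ext _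
      (fun (d : Int) (k : Nat) => d + (if p[k]? ≠ q[k]? then (1:Int) else 0)) _ ?_)
    (Eq.trans (PySem.List.foldl_add _ _ _) ?_)
  · intro d k _
    have e1 : ((fun (k : Nat) => (0:Int) + (k : Int)) ∘ Nat.succ) k = ((k + 1 : Nat) : Int) := by
      simp [Function.comp]
    rw [e1, PySem.List.pyGet?_natCast, PySem.List.pyGet?_natCast,
      List.getElem?_cons_succ, List.getElem?_cons_succ]
    split <;> simp_all
  · rw [List.foldl_ext
      (fun (d : Int) (k : Nat) =>
        if PySem.List.pyGet? p (0 + (k : Int)) ≠ PySem.List.pyGet? q (0 + (k : Int)) then d + 1 else d)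
      (fun (d : Int) (k : Nat) => d + (if p[k]? ≠ q[k]? then (1:Int) else 0)) 0
      (by
        intro d k _
        have e2 : (0 : Int) + (k : Int) = ((k : Nat) : Int) := by ring
        simp only [e2, PySem.List.pyGet?_natCast]
        split <;> simp_all),
      PySem.List.foldl_add]
    have h0a : PySem.List.pyGet? (a :: p) ((0:Int) + ((0:Nat) : Int)) = some a := by
      norm_num [PySem.List.pyGet?_natCast]
    have h0b : PySem.List.pyGet? (b :: q) ((0:Int) + ((0:Nat) : Int)) = some b := by
      norm_num [PySem.List.pyGet?_natCast]
    rw [h0a, h0b]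
    by_cases hab : a = b <;> simp [hab]

-- proof-side recursive characterisation of Source B's loop (front-to-back)
def pvBp (d : Int) : List Char → List (List Char × Int)
  | [] => []
  | [c] => pvNucs.map (fun t => ([t], if t = c then 0 else 1))
  | c :: c' :: rest => pvStepB d c (pvBp d (c' :: rest))

theorem stepB_flatMap (d : Int) (c : Char) (l : List (List Char × Int)) :
    pvStepB d c l = l.flatMap (fun p =>
      if p.2 < d then pvNucs.map (fun n => (n :: p.1, p.2 + (if n ≠ c then 1 else 0)))
      else [(c :: p.1, p.2)]) := by
  unfold pvStepB
  refine Eq.trans (List.foldl_ext _ (fun new p =>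
      new ++ (if p.2 < d then pvNucs.map (fun n => (n :: p.1, p.2 + (if n ≠ c then 1 else 0)))
              else [(c :: p.1, p.2)])) _ ?_) ?_
  · intro acc p _; dsimp only; split <;> rfl
  · rw [PySem.List.foldl_append_eq_flatMap, List.nil_append]

theorem foldl_rev (d : Int) : ∀ (front : List Char) (last : Char),
    front.reverse.foldl (fun acc c => pvStepB d c acc)
        (pvNucs.map (fun t => ([t], if t = last then 0 else 1)))
      = pvBp d (front ++ [last]) := by
  intro front
  induction front with
  | nil => intro last; simp [pvBp]
  | cons c fr ih =>
    intro last
    rw [List.reverse_cons, List.foldl_append]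
    simp only [List.foldl_cons, List.foldl_nil, ih last]
    cases fr with
    | nil => simp [pvBp]
    | cons z zs => simp [pvBp]

theorem coreB_eq_Bp (cs : List Char) (d : Int) (h : cs ≠ []) : pvCoreB cs d = pvBp d cs := by
  obtain ⟨last, restRev, hrev⟩ := List.exists_cons_of_ne_nil (List.reverse_ne_nil_iff.mpr h)
  have hcs : cs = restRev.reverse ++ [last] := by
    have := congrArg List.reverse hrev
    simpa [List.reverse_cons] using this
  unfold pvCoreB
  rw [hrev]
  dsimp only
  have := foldl_rev d restRev.reverse last
  rw [List.reverse_reverse] at this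
  rw [this, ← hcs]

theorem main_equiv (d : Int) (hd : d ≠ 0) : ∀ (cs : List Char), cs ≠ [] →
    pvCoreA cs d = (pvBp d cs).map Prod.fst ∧
      ∀ p ∈ pvBp d cs, p.2 = pvHamming cs p.1 := by
  intro cs
  induction cs with
  | nil => intro h; exact absurd rfl h
  | cons c rest ih =>
    intro _
    cases rest with
    | nil =>
      constructor
      · simp [pvCoreA, pvBp, hd, pvNucs]
      · intro p hp
        simp only [pvBp, pvNucs, List.mem_map, List.mem_cons] at hp
        obtain ⟨t, _, rfl⟩ := hp
        rw [ham_cons, ham_nil]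
        by_cases h : t = c <;> simp [h, Ne.symm]
    | cons c' rest' =>
      obtain ⟨ihA, ihH⟩ := ih (by simp)
      have hstep := stepB_flatMap d c (pvBp d (c' :: rest'))
      constructor
      · show pvCoreA (c :: c' :: rest') d = _
        rw [pvCoreA]
        simp only [hd, if_false]
        refine Eq.trans (List.foldl_ext _ (fun neighbors text =>
            neighbors ++ (if pvHamming (c' :: rest') text < d then pvNucs.map (fun n => n :: text)
                          else [c :: text])) _ ?_) ?_
        · intro acc t _; dsimp only; split <;> rfl
        rw [PySem.List.foldl_append_eq_flatMap, List.nil_append, ihA, List.flatMap_map]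
        show _ = (pvBp d (c :: c' :: rest')).map Prod.fst
        rw [show pvBp d (c :: c' :: rest') = pvStepB d c (pvBp d (c' :: rest')) from rfl,
          hstep, List.map_flatMap]
        refine List.flatMap_congr ?_
        intro p hp
        rw [← ihH p hp]
        split <;> simp [pvNucs]
      · intro p hp
        rw [show pvBp d (c :: c' :: rest') = pvStepB d c (pvBp d (c' :: rest')) from rfl,
          hstep] at hp
        rw [List.mem_flatMap] at hp
        obtain ⟨q, hq, hpq⟩ := hp
        have hh := ihH q hq
        split at hpq
        · simp only [List.mem_map] at hpq
          obtain ⟨n, _, rfl⟩ := hpq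
          simp only [ham_cons, ← hh]
          by_cases hnc : n = c <;> simp [hnc, Ne.symm]; ring
        · simp only [List.mem_singleton] at hpq
          subst hpq
          simp [ham_cons, ← hh]

-- ===== VERDICT (by name: the statement is the Claim_ definition above) =====
theorem GenNeighbors_spec : Claim_equal_GenNeighbors := by
  intro pattern distance _ hpre
  obtain ⟨hp, hd⟩ := hpre
  have hl : pattern.toList ≠ [] := by
    simp only [ne_eq, String.toList_eq_nil_iff, hp, not_false_eq_true]
  unfold Spec_GenNeighbors GenNeighbors GenNeighbors_alt
  rw [if_neg hd, coreB_eq_Bp _ _ hl, (main_equiv distance hd pattern.toList hl).1, List.map_map]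
  rfl
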